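-- pv_equiv track=rewrite | github.com/goel-67/DT-Birck-nH-ML | pareto.py | _get_cumulative_highlight_lots
-- ===== SOURCE A (Python) =====
-- def _get_cumulative_highlight_lots(iterations, target_iteration):
--     """Get cumulative highlight lots up to a specific iteration"""
--     if target_iteration < 0:
--         return []
--
--     highlight_lots = []
--     for i in range(target_iteration + 1):
--         if i in iterations:
--             highlight_lots.extend(iterations[i])
--
--     return highlight_lots
-- ===== SOURCE B (Python) =====
-- def _get_cumulative_highlight_lots(iterations, target_iteration):
--     """Get cumulative highlight lots up to a specific iteration"""
--     out = []
--     for k in sorted(k for k in iterations if 0 <= k <= target_iteration):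
--         out.extend(iterations[k])
--     return out
-- ===== Notes on version B (the rewrite author's own statement) =====
-- stated objective: alternative
-- what changed: Instead of scanning every integer 0..target_iteration and testing dict membership, B sorts the dict's own keys that lie in [0, target_iteration] and extends once per key, so the work depends on the number of keys rather than on target_iteration.
import Mathlib
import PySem

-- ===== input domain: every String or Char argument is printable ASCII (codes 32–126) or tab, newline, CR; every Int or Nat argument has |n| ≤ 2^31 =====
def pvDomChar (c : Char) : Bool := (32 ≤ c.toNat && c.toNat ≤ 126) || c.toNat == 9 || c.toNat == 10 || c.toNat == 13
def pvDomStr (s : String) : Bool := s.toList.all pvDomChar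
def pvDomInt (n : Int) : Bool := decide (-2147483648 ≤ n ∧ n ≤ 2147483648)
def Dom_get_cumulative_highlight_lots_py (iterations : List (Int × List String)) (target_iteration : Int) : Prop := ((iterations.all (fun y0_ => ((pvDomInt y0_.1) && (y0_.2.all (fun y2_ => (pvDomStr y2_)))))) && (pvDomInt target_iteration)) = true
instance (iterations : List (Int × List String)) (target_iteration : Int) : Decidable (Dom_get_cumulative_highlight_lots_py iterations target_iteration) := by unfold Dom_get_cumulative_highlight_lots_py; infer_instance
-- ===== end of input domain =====

-- B replaces A's scan over every integer 0..target_iteration by a sort of the dict's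
-- own keys in range: a different traversal whose work depends on the key count.

-- ===== PORT A =====
-- dict lookup (first match) on the association list
def get_cumulative_highlight_lots_py (iterations : List (Int × List String)) (target_iteration : Int) : List String :=
  if target_iteration < 0 then []
  else
    -- for i in range(target_iteration + 1): if i in iterations: highlight_lots.extend(iterations[i])
    (PySem.List.pyRange 0 (target_iteration + 1) 1).foldl
      (fun acc i =>
        if (List.lookup i iterations).isSome then acc ++ (List.lookup i iterations).getD []
        else acc) []

-- ===== PORT B =====
def get_cumulative_highlight_lots_py_alt (iterations : List (Int × List String)) (target_iteration : Int) : List String :=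
  -- for k in sorted(k for k in iterations if 0 <= k <= target_iteration): out.extend(iterations[k])
  (PySem.List.sorted
      ((PySem.List.dedup (iterations.map Prod.fst)).filter
        (fun k => decide (0 ≤ k) && decide (k ≤ target_iteration)))
      (fun x => x) false).foldl
    (fun acc k => acc ++ (List.lookup k iterations).getD []) []

-- ===== PRECONDITION & SPEC =====
def Spec_get_cumulative_highlight_lots_py (iterations : List (Int × List String)) (target_iteration : Int) (out : List String) : Prop := out = get_cumulative_highlight_lots_py_alt iterations target_iteration
instance (iterations : List (Int × List String)) (target_iteration : Int) (out : List String) : Decidable (Spec_get_cumulative_highlight_lots_py iterations target_iteration out) := by unfold Spec_get_cumulative_highlight_lots_py; infer_instance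

-- ===== CLAIM (what is proved, stated in full; the proofs are below) =====
def Claim_equal_get_cumulative_highlight_lots_py : Prop := ∀ (iterations : List (Int × List String)) (target_iteration : Int), Dom_get_cumulative_highlight_lots_py iterations target_iteration → Spec_get_cumulative_highlight_lots_py iterations target_iteration (get_cumulative_highlight_lots_py iterations target_iteration)

-- ===== LEMMAS AND PROOFS =====

-- first-match lookup succeeds exactly on the recorded keys
theorem pv_lookup_isSome_iff {β : Type} (l : List (Int × β)) (i : Int) :
    (List.lookup i l).isSome = true ↔ i ∈ l.map Prod.fst := by
  induction l with
  | nil => simp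
  | cons p t ih =>
    cases p with
    | mk k v =>
      by_cases h : k = i
      · subst h; simp [List.lookup]
      · have hb : (i == k) = false := by simp [Ne.symm h]
        simp [List.lookup, hb, ih]
        intro hik
        exact absurd hik.symm h

-- flatMap with an 'if' filter
theorem pv_flatMap_ite_filter {α β : Type} (l : List α) (p : α → Bool) (g : α → List β) :
    l.flatMap (fun x => if p x then g x else []) = (l.filter p).flatMap g := by
  induction l with
  | nil => rfl
  | cons x t ih =>
    by_cases h : p x = true <;> simp [List.filter, h, ih]

-- A's visited keys (the in-range keys in increasing order) are exactly B's sorted key list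
theorem pv_keys_eq (iterations : List (Int × List String)) (t : Int) :
    PySem.List.sorted
      ((PySem.List.dedup (iterations.map Prod.fst)).filter
        (fun k => decide (0 ≤ k) && decide (k ≤ t)))
      (fun x => x) false
    = (PySem.List.pyRange 0 (t + 1) 1).filter (fun i => (List.lookup i iterations).isSome) := by
  apply PySem.List.sorted_eq_of_perm_of_pairwise_lt
  · rw [List.perm_ext_iff_of_nodup (List.Nodup.filter _ (PySem.List.nodup_pyRange_one 0 (t + 1)))
      (List.Nodup.filter _ (PySem.List.nodup_dedup _))]
    intro a
    simp only [List.mem_filter, PySem.List.mem_pyRange_one, PySem.List.mem_dedup,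
      pv_lookup_isSome_iff, Bool.and_eq_true, decide_eq_true_eq]
    constructor
    · rintro ⟨⟨h0, h1⟩, hm⟩; exact ⟨hm, h0, by omega⟩
    · rintro ⟨hm, h0, h1⟩; exact ⟨⟨h0, by omega⟩, hm⟩
  · exact List.Pairwise.filter _ (PySem.List.pairwise_lt_pyRange_one 0 (t + 1))

-- ===== VERDICT (by name: the statement is the Claim_ definition above) =====
theorem get_cumulative_highlight_lots_py_spec : Claim_equal_get_cumulative_highlight_lots_py := by
  intro iterations t _
  unfold Spec_get_cumulative_highlight_lots_py
  unfold get_cumulative_highlight_lots_py get_cumulative_highlight_lots_py_alt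
  by_cases ht : t < 0
  · simp only [ht, if_true]
    have : ((PySem.List.dedup (iterations.map Prod.fst)).filter
        (fun k => decide (0 ≤ k) && decide (k ≤ t))) = [] := by
      apply List.filter_eq_nil_iff.mpr
      intro k _
      simp only [Bool.and_eq_true, decide_eq_true_eq, not_and]
      omega
    rw [this]
    rfl
  · simp only [ht, if_false]
    have : ∀ (l : List Int),
        l.foldl (fun acc i => if (List.lookup i iterations).isSome then
            acc ++ (List.lookup i iterations).getD [] else acc) ([] : List String)
        = l.flatMap (fun i => if (List.lookup i iterations).isSome then
            (List.lookup i iterations).getD [] else []) := by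
      intro l
      have h := PySem.List.foldl_append_eq_flatMap
        (fun i => if (List.lookup i iterations).isSome then
          (List.lookup i iterations).getD [] else []) l ([] : List String)
      simp only [List.nil_append] at h
      rw [← h]
      apply PySem.List.foldl_congr_mem
      intro acc i _
      by_cases hs : (List.lookup i iterations).isSome = true <;> simp [hs]
    rw [this, pv_flatMap_ite_filter, ← pv_keys_eq iterations t]
    simp [List.flatMap_def]
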